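-- pv_equiv track=rewrite | github.com/hjk0761/Almumol | fromitive/softeer/yeah-but-how.py | solve
-- ===== SOURCE A (Python) =====
-- def solve(S):
--     result = []
--     before = ''
--     for c in S:
--         if before == '(' and c == '(':
--             pass
--         if before == '(' and c == ')':
--             result.append('1')
--         if before == ')' and c == '(':
--             result.append('+')
--         if before == ')' and c == ')':
--             pass
--         before = c
--         result.append(c)
--     return "".join(result)
-- ===== SOURCE B (Python) =====
-- def solve(S):
--     return S.replace("()", "(1)").replace(")(", ")+(")
-- ===== Notes on version B (the rewrite author's own statement) =====
-- stated objective: idiomatic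
-- what changed: Replaced the explicit character loop with its `before` state variable and result list by two chained non-overlapping str.replace substitutions: '()'->'(1)' then ')('->')+('.
import Mathlib
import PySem

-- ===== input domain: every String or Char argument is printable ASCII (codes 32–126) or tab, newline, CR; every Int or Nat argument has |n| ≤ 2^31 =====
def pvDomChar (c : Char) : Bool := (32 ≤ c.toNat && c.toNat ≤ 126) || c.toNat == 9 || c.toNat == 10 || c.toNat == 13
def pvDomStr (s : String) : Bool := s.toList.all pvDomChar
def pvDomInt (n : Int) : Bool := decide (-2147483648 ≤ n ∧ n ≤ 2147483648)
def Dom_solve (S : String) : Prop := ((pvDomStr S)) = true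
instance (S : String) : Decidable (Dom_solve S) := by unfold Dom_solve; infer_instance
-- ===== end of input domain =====

-- B rewrites A's explicit character loop (with its `before` state) as two chained
-- non-overlapping str.replace substitutions: "()"→"(1)" then ")("→")+(" (idiomatic).

-- ===== PORT A =====
-- the loop body of A's `for c in S` (the two `pass` branches do nothing and are omitted)
def solveStep (st : List String × String) (c : Char) : List String × String :=
  let result := if st.2 = "(" ∧ c = ')' then st.1 ++ ["1"] else st.1
  let result := if st.2 = ")" ∧ c = '(' then result ++ ["+"] else result
  (result ++ [String.ofList [c]], String.ofList [c])

def solve (S : String) : String :=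
  PySem.Str.join "" (S.toList.foldl solveStep ([], "")).1

-- ===== PORT B =====
def solve_alt (S : String) : String :=
  PySem.Str.replace (PySem.Str.replace S "()" "(1)") ")(" ")+("

-- ===== PRECONDITION & SPEC =====
def Spec_solve (S : String) (out : String) : Prop := out = solve_alt S
instance (S : String) (out : String) : Decidable (Spec_solve S out) := by unfold Spec_solve; infer_instance

-- ===== CLAIM (what is proved, stated in full; the proofs are below) =====
def Claim_equal_solve : Prop := ∀ (S : String), Dom_solve S → Spec_solve S (solve S)

-- ===== LEMMAS AND PROOFS =====

-- the common specification: insert '1' between adjacent "()" and '+' between adjacent ")(",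
-- threading the previous character as a one-character string exactly like A's `before`
def fb (bef : String) : List Char → List Char
  | [] => []
  | c :: r =>
      (if bef = "(" ∧ c = ')' then ['1'] else []) ++
      (if bef = ")" ∧ c = '(' then ['+'] else []) ++ c :: fb (String.ofList [c]) r

-- natural recursion computing `replace` for a two-character pattern [x, y]
def repNat (x y : Char) (nw : List Char) : List Char → List Char
  | [] => []
  | [c] => [c]
  | c :: d :: t =>
      if c = x ∧ d = y then nw ++ repNat x y nw t else c :: repNat x y nw (d :: t)
termination_by l => l.length

-- single-pattern adjacency insertion threading the previous character
def ins (x y m : Char) (b : Option Char) : List Char → List Char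
  | [] => []
  | c :: r => (if b = some x ∧ c = y then [m] else []) ++ c :: ins x y m (some c) r

theorem foldl_solveStep (l : List Char) (res : List String) (bef : String) :
    (l.foldl solveStep (res, bef)).1 = res ++ (fb bef l).map (fun c => String.ofList [c]) := by
  induction l generalizing res bef with
  | nil => simp [fb]
  | cons c r ih =>
      simp only [List.foldl_cons, solveStep, fb]
      rw [ih]
      split_ifs with h1 h2 h2 <;> simp_all

theorem go_zero (old nw : List Char) (l acc : List Char) :
    PySem.Chars.replace.go old nw 0 l acc = acc.reverse ++ l := rfl

theorem go_succ_nil (old nw : List Char) (n : Nat) (acc : List Char) :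
    PySem.Chars.replace.go old nw (n + 1) [] acc = acc.reverse := rfl

theorem go_succ_cons (old nw : List Char) (n : Nat) (c : Char) (t acc : List Char) :
    PySem.Chars.replace.go old nw (n + 1) (c :: t) acc =
      if old.isPrefixOf (c :: t) then
        PySem.Chars.replace.go old nw n (List.drop old.length (c :: t)) (nw.reverse ++ acc)
      else PySem.Chars.replace.go old nw n t (c :: acc) := rfl

theorem go_eq_repNat (x y : Char) (nw : List Char) (fuel : Nat) :
    ∀ (l acc : List Char), l.length ≤ fuel →
      PySem.Chars.replace.go [x, y] nw fuel l acc = acc.reverse ++ repNat x y nw l := by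
  induction fuel with
  | zero =>
      intro l acc h
      have : l = [] := by cases l <;> simp_all
      subst this
      rw [go_zero]
      simp [repNat]
  | succ n ih =>
      intro l acc h
      match l with
      | [] => rw [go_succ_nil]; simp [repNat]
      | [c] =>
          rw [go_succ_cons]
          have hp : ([x, y].isPrefixOf [c]) = false := by
            simp [List.isPrefixOf]
          rw [if_neg (by simp [hp])]
          cases n with
          | zero => rw [go_zero]; simp [repNat]
          | succ k => rw [go_succ_nil]; simp [repNat]
      | c :: d :: t =>
          rw [go_succ_cons]
          by_cases hc : c = x ∧ d = y
          · obtain ⟨hc1, hc2⟩ := hc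
            subst hc1; subst hc2
            have hp : ([c, d].isPrefixOf (c :: d :: t)) = true := by
              simp [List.isPrefixOf]
            rw [if_pos hp]
            have hd : List.drop ([c, d].length) (c :: d :: t) = t := by simp
            rw [hd]
            rw [ih t (nw.reverse ++ acc) (by simp at h ⊢; omega)]
            rw [repNat, if_pos ⟨rfl, rfl⟩]
            simp
          · have hp : ([x, y].isPrefixOf (c :: d :: t)) = false := by
              simp [List.isPrefixOf]
              intro h1 h2
              exact hc ⟨h1.symm, h2.symm⟩
            rw [if_neg (by simp [hp])]
            rw [ih (d :: t) (c :: acc) (by simp at h ⊢; omega)]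
            rw [repNat, if_neg hc]
            simp

theorem replace_eq_repNat (x y : Char) (nw : List Char) (l : List Char) :
    PySem.Chars.replace l [x, y] nw = repNat x y nw l := by
  unfold PySem.Chars.replace
  simp only [List.isEmpty_cons, Bool.false_eq_true, if_false]
  simpa using go_eq_repNat x y nw l.length l [] (le_refl _)

theorem repNat_eq_ins (x y m : Char) (hxy : x ≠ y) :
    ∀ (l : List Char) (b : Option Char), (b ≠ some x ∨ l.head? ≠ some y) →
      repNat x y [x, m, y] l = ins x y m b l := by
  intro l
  induction l using repNat.induct x y with
  | case1 => intro b _; simp [repNat, ins]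
  | case2 c =>
      intro b hb
      have : ¬ (b = some x ∧ c = y) := by
        rcases hb with h | h
        · exact fun hc => h hc.1
        · exact fun hc => h (by simp [hc.2])
      simp [repNat, ins, this]
  | case3 c d t hcd ih =>
      intro b hb
      obtain ⟨hc, hd⟩ := hcd
      subst hc; subst hd
      rw [repNat, if_pos ⟨rfl, rfl⟩]
      have h1 : ¬ (b = some c ∧ c = d) := fun h => hxy h.2
      rw [ins, if_neg h1]
      rw [ins, if_pos ⟨rfl, rfl⟩]
      rw [ih (some d) (Or.inl (by simp [Ne.symm hxy]))]
      simp
  | case4 c d t hcd ih =>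
      intro b hb
      rw [repNat, if_neg hcd]
      have h1 : ¬ (b = some x ∧ c = y) := by
        rcases hb with h | h
        · exact fun hc => h hc.1
        · exact fun hc => h (by simp [hc.2])
      rw [ins, if_neg h1]
      have hb' : some c ≠ some x ∨ (d :: t).head? ≠ some y := by
        rcases not_and_or.mp hcd with h | h
        · left; simpa using h
        · right; simpa using h
      rw [ih (some c) hb']
      simp

theorem ofList_singleton_eq_iff (c d : Char) : String.ofList [c] = String.ofList [d] ↔ c = d := by
  constructor
  · intro h
    have := congrArg String.toList h
    simpa using this
  · intro h; rw [h]

theorem ofList_single_eq_paren (d : Char) :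
    ((String.ofList [d] = "(") ↔ d = '(') ∧ ((String.ofList [d] = ")") ↔ d = ')') := by
  constructor
  · have h : "(" = String.ofList ['('] := rfl
    rw [h, ofList_singleton_eq_iff]
  · have h : ")" = String.ofList [')'] := rfl
    rw [h, ofList_singleton_eq_iff]

theorem ins_cons (x y m : Char) (b : Option Char) (c : Char) (r : List Char) :
    ins x y m b (c :: r) = (if b = some x ∧ c = y then [m] else []) ++ c :: ins x y m (some c) r := by
  rw [ins]

theorem ins_comp_eq_fb :
    ∀ (l : List Char) (bef : String) (b : Option Char),
      (bef = "(" ↔ b = some '(') → (bef = ")" ↔ b = some ')') →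
      ins ')' '(' '+' b (ins '(' ')' '1' b l) = fb bef l := by
  intro l
  induction l with
  | nil => intro bef b _ _; simp [ins, fb]
  | cons c r ih =>
      intro bef b h1 h2
      by_cases hm : b = some '(' ∧ c = ')'
      · obtain ⟨hb, hc⟩ := hm
        subst hc
        rw [ins_cons, if_pos ⟨hb, rfl⟩]
        simp only [List.singleton_append]
        rw [ins_cons, if_neg (by simp [hb])]
        simp only [List.nil_append]
        rw [ins_cons, if_neg (by simp)]
        simp only [List.nil_append]
        rw [ih (String.ofList [')']) (some ')')
              ((ofList_single_eq_paren ')').1.trans (by simp)) ((ofList_single_eq_paren ')').2.trans (by simp))]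
        rw [fb, if_pos ⟨h1.mpr hb, rfl⟩,
            if_neg (by rintro ⟨hh, -⟩; rw [h2, hb] at hh; simp at hh)]
        rfl
      · have hm1 : ¬ (bef = "(" ∧ c = ')') := by
          rintro ⟨hh, hc⟩; exact hm ⟨h1.mp hh, hc⟩
        rw [ins_cons, if_neg hm]
        simp only [List.nil_append]
        rw [ins_cons]
        rw [ih (String.ofList [c]) (some c)
              ((ofList_single_eq_paren c).1.trans (by simp)) ((ofList_single_eq_paren c).2.trans (by simp))]
        rw [fb, if_neg hm1]
        have heq : (b = some ')' ∧ c = '(') = (bef = ")" ∧ c = '(') := by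
          apply propext
          constructor
          · rintro ⟨hh, hc⟩; exact ⟨h2.mpr hh, hc⟩
          · rintro ⟨hh, hc⟩; exact ⟨h2.mp hh, hc⟩
        simp only [heq]
        simp

theorem solve_toList (S : String) : (solve S).toList = fb "" S.toList := by
  unfold solve
  rw [foldl_solveStep]
  simp only [List.nil_append]
  have h1 : (PySem.Str.join "" ((fb "" S.toList).map (fun c => String.ofList [c]))).toList
      = PySem.Chars.join [] (((fb "" S.toList).map (fun c => String.ofList [c])).map String.toList) := by
    simp [PySem.Str.toList_join]
  rw [h1]
  have h2 : ((fb "" S.toList).map (fun c => String.ofList [c])).map String.toList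
      = (fb "" S.toList).map (fun c => [c]) := by
    simp
  rw [h2, PySem.Chars.join_nil_singletons]

theorem solve_alt_toList (S : String) : (solve_alt S).toList = fb "" S.toList := by
  unfold solve_alt
  rw [PySem.Str.toList_replace, PySem.Str.toList_replace]
  have e1 : ("()" : String).toList = ['(', ')'] := rfl
  have e2 : ("(1)" : String).toList = ['(', '1', ')'] := rfl
  have e3 : (")(" : String).toList = [')', '('] := rfl
  have e4 : (")+(" : String).toList = [')', '+', '('] := rfl
  rw [e1, e2, e3, e4]
  rw [replace_eq_repNat, replace_eq_repNat]
  rw [repNat_eq_ins '(' ')' '1' (by decide) S.toList none (Or.inl (by simp))]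
  rw [repNat_eq_ins ')' '(' '+' (by decide) _ none (Or.inl (by simp))]
  exact ins_comp_eq_fb S.toList "" none (by simp) (by simp)

-- ===== VERDICT (by name: the statement is the Claim_ definition above) =====
theorem solve_spec : Claim_equal_solve := by
  intro S _
  unfold Spec_solve
  have h : (solve S).toList = (solve_alt S).toList := by
    rw [solve_toList, solve_alt_toList]
  calc solve S = String.ofList (solve S).toList := (String.ofList_toList).symm
    _ = String.ofList (solve_alt S).toList := by rw [h]
    _ = solve_alt S := String.ofList_toList
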